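-- pv_equiv track=rewrite | github.com/KitTheFox123/workspace | scripts/heartbeat-cost-analyzer.py | score_actions
-- ===== SOURCE A (Python) =====
-- COST_ESTIMATES = {
--     'context_load': 8000,      # Reading HEARTBEAT.md, SOUL.md, MEMORY.md, etc
--     'platform_check': 2000,    # Each API call + response parsing
--     'keenable_search': 3000,   # Search + fetch + feedback
--     'clawk_reply': 1500,       # Composing + posting
--     'moltbook_comment': 2000,  # Composing + captcha + verify
--     'build_action': 5000,      # Script creation
--     'daily_log_update': 1000,  # Appending to memory file
--     'telegram_notify': 500,    # Message to Ilya
--     'like_action': 200,        # Trivial API call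
--     'captcha_solve': 800,      # Parse + solve + verify
-- }
--
-- PRODUCTIVE_ACTIONS = {'clawk_reply', 'moltbook_comment', 'build_action', 'keenable_search'}
--
-- def score_actions(actions: dict) -> tuple:
--     """Return (productive_tokens, overhead_tokens)."""
--     productive = 0
--     overhead = 0
--     for action, count in actions.items():
--         tokens = COST_ESTIMATES.get(action, 1000) * count
--         if action in PRODUCTIVE_ACTIONS:
--             productive += tokens
--         else:
--             overhead += tokens
--     return productive, overhead
-- ===== SOURCE B (Python) =====
-- COST_ESTIMATES = {
--     'context_load': 8000,
--     'platform_check': 2000,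
--     'keenable_search': 3000,
--     'clawk_reply': 1500,
--     'moltbook_comment': 2000,
--     'build_action': 5000,
--     'daily_log_update': 1000,
--     'telegram_notify': 500,
--     'like_action': 200,
--     'captcha_solve': 800,
-- }
--
-- PRODUCTIVE_ACTIONS = {'clawk_reply', 'moltbook_comment', 'build_action', 'keenable_search'}
--
-- def score_actions(actions: dict) -> tuple:
--     """Return (productive_tokens, overhead_tokens)."""
--     total = sum(COST_ESTIMATES.get(a, 1000) * c for a, c in actions.items())
--     productive = sum(COST_ESTIMATES.get(a, 1000) * c
--                      for a, c in actions.items() if a in PRODUCTIVE_ACTIONS)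
--     return productive, total - productive
-- ===== Notes on version B (the rewrite author's own statement) =====
-- stated objective: alternative
-- what changed: B computes the grand total and the productive total as two sums and derives overhead as total minus productive, instead of A's single loop accumulating into two branch-selected counters.
import Mathlib
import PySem

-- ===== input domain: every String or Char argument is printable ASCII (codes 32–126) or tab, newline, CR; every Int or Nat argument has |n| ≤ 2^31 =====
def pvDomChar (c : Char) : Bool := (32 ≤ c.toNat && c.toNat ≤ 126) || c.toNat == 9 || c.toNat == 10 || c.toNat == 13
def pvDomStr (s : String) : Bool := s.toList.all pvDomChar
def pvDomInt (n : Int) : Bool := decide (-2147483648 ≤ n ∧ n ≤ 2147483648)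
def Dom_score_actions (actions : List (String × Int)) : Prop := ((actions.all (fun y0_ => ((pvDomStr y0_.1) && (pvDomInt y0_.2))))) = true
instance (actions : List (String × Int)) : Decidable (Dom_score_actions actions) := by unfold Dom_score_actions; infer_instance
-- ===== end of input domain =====

-- B computes the grand total and the productive total as two sums and derives
-- overhead as total − productive, instead of A's single loop with two branch-selected counters.

-- shared module constants (same-module context of both programs)
def COST_ESTIMATES : PySem.Dict String Int := PySem.Dict.ofList
  [("context_load", 8000), ("platform_check", 2000), ("keenable_search", 3000),
   ("clawk_reply", 1500), ("moltbook_comment", 2000), ("build_action", 5000),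
   ("daily_log_update", 1000), ("telegram_notify", 500), ("like_action", 200),
   ("captcha_solve", 800)]

def PRODUCTIVE_ACTIONS : PySem.Set String :=
  PySem.Set.ofList ["clawk_reply", "moltbook_comment", "build_action", "keenable_search"]

-- ===== PORT A =====
def score_actions (actions : List (String × Int)) : Int × Int :=
  let st := actions.foldl (fun (acc : Int × Int) ac =>
    let tokens := (COST_ESTIMATES.getD ac.1 1000) * ac.2
    if PRODUCTIVE_ACTIONS.contains ac.1 then (acc.1 + tokens, acc.2)
    else (acc.1, acc.2 + tokens)) (0, 0)
  (st.1, st.2)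

-- ===== PORT B =====
def score_actions_alt (actions : List (String × Int)) : Int × Int :=
  let total := (actions.map (fun ac => (COST_ESTIMATES.getD ac.1 1000) * ac.2)).sum
  let productive := ((actions.filter (fun ac => PRODUCTIVE_ACTIONS.contains ac.1)).map
    (fun ac => (COST_ESTIMATES.getD ac.1 1000) * ac.2)).sum
  (productive, total - productive)

-- ===== PRECONDITION & SPEC =====
def Spec_score_actions (actions : List (String × Int)) (out : Int × Int) : Prop := out = score_actions_alt actions
instance (actions : List (String × Int)) (out : Int × Int) : Decidable (Spec_score_actions actions out) := by unfold Spec_score_actions; infer_instance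

-- ===== CLAIM (what is proved, stated in full; the proofs are below) =====
def Claim_equal_score_actions : Prop := ∀ (actions : List (String × Int)), Dom_score_actions actions → Spec_score_actions actions (score_actions actions)

-- ===== LEMMAS AND PROOFS =====

def pvTok (ac : String × Int) : Int := (COST_ESTIMATES.getD ac.1 1000) * ac.2

lemma score_actions_foldl (l : List (String × Int)) (p o : Int) :
    l.foldl (fun (acc : Int × Int) ac =>
      let tokens := (COST_ESTIMATES.getD ac.1 1000) * ac.2
      if PRODUCTIVE_ACTIONS.contains ac.1 then (acc.1 + tokens, acc.2)
      else (acc.1, acc.2 + tokens)) (p, o)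
    = (p + ((l.filter (fun ac => PRODUCTIVE_ACTIONS.contains ac.1)).map pvTok).sum,
       o + ((l.map pvTok).sum - ((l.filter (fun ac => PRODUCTIVE_ACTIONS.contains ac.1)).map pvTok).sum)) := by
  induction l generalizing p o with
  | nil => simp
  | cons hd tl ih =>
    simp only [List.foldl_cons]
    by_cases h : PRODUCTIVE_ACTIONS.contains hd.1
    · simp only [h, if_pos, ih, List.filter_cons, List.map_cons, List.sum_cons, pvTok,
        Prod.mk.injEq]
      constructor <;> ring
    · simp only [h, ih, List.filter_cons, List.map_cons, List.sum_cons, pvTok]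
      simp
      ring

-- ===== VERDICT (by name: the statement is the Claim_ definition above) =====
theorem score_actions_spec : Claim_equal_score_actions := by
  intro actions _
  show _ = _
  simp only [score_actions, score_actions_alt, score_actions_foldl, zero_add]
  rfl
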